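-- pv_equiv track=rewrite | github.com/xiaohuanlin/Algorithms | Leetcode/2925. Maximum Score After Applying Operations on a Tree.py | maximumScoreAfterOperations
-- ===== SOURCE A (Python) =====
-- from typing import List
--
-- from functools import lru_cache
-- from collections import defaultdict
--
-- def maximumScoreAfterOperations(edges: List[List[int]], values: List[int]) -> int:
--     graph = defaultdict(list)
--     for u, v in edges:
--         graph[u].append(v)
--         graph[v].append(u)
--
--     @lru_cache
--     def get_sum(index, parent):
--         s = values[index]
--         for n in graph[index]:
--             if n == parent:
--                 continue
--             s += get_sum(n, index)
--         return s
--
--     @lru_cache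
--     def get_result(index, parent):
--         if len(graph[index]) == 1 and graph[index][0] == parent:
--             # only one node
--             return 0
--
--         delete_res = values[index]
--         for n in graph[index]:
--             if n == parent:
--                 continue
--             delete_res += get_result(n, index)
--         keep_res = get_sum(index, parent) - values[index]
--         return max(delete_res, keep_res)
--
--     return get_result(0, -1)
-- ===== SOURCE B (Python) =====
-- from typing import List
-- from collections import defaultdict
--
-- def maximumScoreAfterOperations(edges: List[List[int]], values: List[int]) -> int:
--     graph = defaultdict(list)
--     for u, v in edges:
--         graph[u].append(v)
--         graph[v].append(u)
--
--     def dfs(node, parent):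
--         # returns (subtree sum, best healthy score for this subtree)
--         adj = graph[node]
--         if adj == [parent]:
--             return values[node], 0
--         total = best = 0
--         for n in adj:
--             if n == parent:
--                 continue
--             t, b = dfs(n, node)
--             total += t
--             best += b
--         v = values[node]
--         return v + total, max(v + best, total)
--
--     return dfs(0, -1)[1]
-- ===== Notes on version B (the rewrite author's own statement) =====
-- stated objective: simpler
-- what changed: A's two separate memoized recursions (get_sum and get_result, each re-walking the subtree) are merged into one plain DFS that returns the pair (subtree_sum, best_score) in a single pass.
-- outside the precondition, e.g. on maximumScoreAfterOperations([[0, -1]], []): A returns 0, B raises IndexError; on maximumScoreAfterOperations([[0, -1], [-1, 5]], [5, 7]): A returns 0, B returns 0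
import Mathlib
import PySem

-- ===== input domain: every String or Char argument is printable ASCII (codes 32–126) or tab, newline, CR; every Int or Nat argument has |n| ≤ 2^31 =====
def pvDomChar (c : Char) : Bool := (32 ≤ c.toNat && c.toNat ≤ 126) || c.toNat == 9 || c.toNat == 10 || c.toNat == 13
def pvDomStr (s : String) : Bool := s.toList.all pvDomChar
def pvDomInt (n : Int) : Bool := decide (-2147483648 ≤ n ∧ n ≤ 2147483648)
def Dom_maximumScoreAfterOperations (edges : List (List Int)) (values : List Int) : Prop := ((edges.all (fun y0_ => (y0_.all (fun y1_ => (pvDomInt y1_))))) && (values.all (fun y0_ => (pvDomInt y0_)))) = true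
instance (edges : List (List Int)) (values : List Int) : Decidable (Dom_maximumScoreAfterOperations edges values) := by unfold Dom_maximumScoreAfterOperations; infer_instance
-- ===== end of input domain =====

-- B replaces A's two separate memoized recursions (get_sum and get_result) by a single
-- DFS returning the pair (subtree sum, best score): simpler, one pass over the tree.
-- Both ports are fueled with 2 * edges.length + 3, enough for any input admitted by Pre_
-- (node 0's component is then a tree with at most one self-looped vertex, so the DFS
-- visits each vertex at most twice along any call chain).

-- ===== PORT A =====
-- shared adjacency construction (the identical first loop of both Pythons)
def pvGraph (edges : List (List Int)) : PySem.Dict Int (List Int) :=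
  edges.foldl (fun g e =>
    match e with
    | [u, v] =>
        let g := g.insert u (g.getD u [] ++ [v])
        g.insert v (g.getD v [] ++ [u])
    | _ => g)  -- unreachable under Pre_ (Python raises on non-pair edges)
    PySem.Dict.empty

def pvGetSumA (edges : List (List Int)) (values : List Int) :
    Nat → Int → Int → Int
  | 0, _, _ => 0  -- unreachable under Pre_: fuel values.length covers any tree depth
  | fuel + 1, index, parent =>
      ((pvGraph edges).getD index []).foldl
        (fun s n => if n = parent then s else s + pvGetSumA edges values fuel n index)
        (PySem.List.pyGetD values index 0)

def pvGetResultA (edges : List (List Int)) (values : List Int) :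
    Nat → Int → Int → Int
  | 0, _, _ => 0  -- unreachable under Pre_
  | fuel + 1, index, parent =>
      let adj := (pvGraph edges).getD index []
      if adj = [parent] then 0  -- len(graph[index]) == 1 and graph[index][0] == parent
      else
        let deleteRes := adj.foldl
          (fun s n => if n = parent then s else s + pvGetResultA edges values fuel n index)
          (PySem.List.pyGetD values index 0)
        let keepRes := pvGetSumA edges values (fuel + 1) index parent -
          PySem.List.pyGetD values index 0
        max deleteRes keepRes

def maximumScoreAfterOperations (edges : List (List Int)) (values : List Int) : Int :=
  pvGetResultA edges values (2 * edges.length + 3) 0 (-1)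

-- ===== PORT B =====
def pvDfsB (edges : List (List Int)) (values : List Int) :
    Nat → Int → Int → Int × Int
  | 0, _, _ => (0, 0)  -- unreachable under Pre_
  | fuel + 1, node, parent =>
      let adj := (pvGraph edges).getD node []
      if adj = [parent] then (PySem.List.pyGetD values node 0, 0)
      else
        let p := adj.foldl
          (fun (p : Int × Int) n =>
            if n = parent then p
            else
              let c := pvDfsB edges values fuel n node
              (p.1 + c.1, p.2 + c.2))
          (0, 0)
        let v := PySem.List.pyGetD values node 0
        (v + p.1, max (v + p.2) p.1)

def maximumScoreAfterOperations_alt (edges : List (List Int)) (values : List Int) : Int :=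
  (pvDfsB edges values (2 * edges.length + 3) 0 (-1)).2

-- ===== PRECONDITION & SPEC =====
-- one breadth-first expansion step of the set of nodes reachable from 0
def pvReachStep (edges : List (List Int)) (r : List Int) : List Int :=
  edges.foldl (fun r e =>
    match e with
    | [u, v] =>
        let r := if v ∈ r then PySem.Set.add r u else r
        if u ∈ r then PySem.Set.add r v else r
    | _ => r) r

def pvReach (edges : List (List Int)) (n : Nat) : List Int :=
  (List.range n).foldl (fun r _ => pvReachStep edges r) [(0 : Int)]

-- the set of node labels reachable from node 0 (edges.length + 1 expansion steps reach a fixpoint)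
def pvComp (edges : List (List Int)) : List Int :=
  pvReach edges (edges.length + 1)

-- the distinct undirected non-loop edges incident to the component of node 0, normalized
def pvSimpleEdges (edges : List (List Int)) (comp : List Int) : List (Int × Int) :=
  PySem.List.dedup
    ((edges.filter (fun e =>
        match e with
        | [u, v] => decide (u ∈ comp) && decide (u ≠ v)
        | _ => false)).map (fun e =>
        match e with
        | [u, v] => (min u v, max u v)
        | _ => ((0 : Int), (0 : Int))))

-- the distinct self-looped vertices inside the component of node 0
def pvLoops (edges : List (List Int)) (comp : List Int) : List Int :=
  PySem.List.dedup
    ((edges.filter (fun e =>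
        match e with
        | [u, v] => decide (u ∈ comp) && decide (u = v)
        | _ => false)).map (fun e => e.getD 0 0))

-- Pre_ = the inputs on which the Python A returns normally, up to two stated narrowings:
-- A raises ValueError on a non-pair edge, RecursionError when node 0's component has a
-- cycle of distinct labels (the tree-count condition below) or two self-looped vertices
-- (they let the recursion ping-pong forever), and IndexError when it reads values[x] at
-- an x outside Python's index range; excluded although A returns there are inputs whose
-- component indices Pre_ checks although A's root-leaf shortcut or parent-label skip would
-- avoid reading some of them (e.g. ([[0, -1]], []), where A returns 0 before reading values
-- and B raises IndexError), and inputs reachable from 0 only through such skipped labels.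
def Pre_maximumScoreAfterOperations (edges : List (List Int)) (values : List Int) : Prop :=
  (∀ e ∈ edges, e.length = 2) ∧
  (∀ x ∈ pvComp edges, -(values.length : Int) ≤ x ∧ x < (values.length : Int)) ∧
  (pvSimpleEdges edges (pvComp edges)).length + 1 = (pvComp edges).length ∧
  (pvLoops edges (pvComp edges)).length ≤ 1

instance (edges : List (List Int)) (values : List Int) :
    Decidable (Pre_maximumScoreAfterOperations edges values) := by
  unfold Pre_maximumScoreAfterOperations; infer_instance

def pvWitness_maximumScoreAfterOperations : List (List Int) × List Int :=
  ([[0, 1], [1, 2]], [2, 3, 5])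

def Spec_maximumScoreAfterOperations (edges : List (List Int)) (values : List Int) (out : Int) : Prop := out = maximumScoreAfterOperations_alt edges values
instance (edges : List (List Int)) (values : List Int) (out : Int) : Decidable (Spec_maximumScoreAfterOperations edges values out) := by unfold Spec_maximumScoreAfterOperations; infer_instance

-- ===== CLAIM (what is proved, stated in full; the proofs are below) =====
def Claim_equal_maximumScoreAfterOperations : Prop := ∀ (edges : List (List Int)) (values : List Int), Dom_maximumScoreAfterOperations edges values → Pre_maximumScoreAfterOperations edges values → Spec_maximumScoreAfterOperations edges values (maximumScoreAfterOperations edges values)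

-- ===== LEMMAS AND PROOFS =====

-- a fold of a pair accumulator splits into the two component folds
theorem pv_foldl_pair_split (l : List Int) (f g : Int → Int) (parent a b : Int) :
    l.foldl (fun (p : Int × Int) n =>
        if n = parent then p else (p.1 + f n, p.2 + g n)) (a, b)
      = (l.foldl (fun s n => if n = parent then s else s + f n) a,
         l.foldl (fun s n => if n = parent then s else s + g n) b) := by
  induction l generalizing a b with
  | nil => rfl
  | cons x xs ih =>
      simp only [List.foldl_cons]
      by_cases hx : x = parent <;> simp [hx, ih]

-- the initial accumulator of such a fold can be pulled out additively
theorem pv_foldl_init_shift (l : List Int) (f : Int → Int) (parent a : Int) :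
    l.foldl (fun s n => if n = parent then s else s + f n) a
      = a + l.foldl (fun s n => if n = parent then s else s + f n) 0 := by
  induction l generalizing a with
  | nil => simp
  | cons x xs ih =>
      simp only [List.foldl_cons]
      by_cases hx : x = parent
      · rw [if_pos hx, if_pos hx, ih a]
      · rw [if_neg hx, if_neg hx, ih (a + f x), ih (0 + f x)]
        ring

-- B's single DFS computes exactly (A's get_sum, A's get_result), at every fuel
theorem pv_dfs_eq (edges : List (List Int)) (values : List Int) :
    ∀ (fuel : Nat) (index parent : Int),
      pvDfsB edges values fuel index parent
        = (pvGetSumA edges values fuel index parent,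
           pvGetResultA edges values fuel index parent) := by
  intro fuel
  induction fuel with
  | zero => intro index parent; rfl
  | succ fuel ih =>
      intro index parent
      simp only [pvDfsB, pvGetSumA, pvGetResultA]
      by_cases hleaf : (pvGraph edges).getD index [] = [parent]
      · simp [hleaf]
      · simp only [if_neg hleaf]
        have hfun : (fun (p : Int × Int) n =>
            if n = parent then p
            else
              let c := pvDfsB edges values fuel n index
              (p.1 + c.1, p.2 + c.2))
          = (fun (p : Int × Int) n =>
            if n = parent then p
            else (p.1 + pvGetSumA edges values fuel n index,
                  p.2 + pvGetResultA edges values fuel n index)) := by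
          funext p n
          by_cases hn : n = parent <;> simp [hn, ih]
        rw [hfun, pv_foldl_pair_split]
        set L := (pvGraph edges).getD index [] with hL
        set S0 := L.foldl (fun s n => if n = parent then s
            else s + pvGetSumA edges values fuel n index) 0 with hS0
        set R0 := L.foldl (fun s n => if n = parent then s
            else s + pvGetResultA edges values fuel n index) 0 with hR0
        set v := PySem.List.pyGetD values index 0 with hv
        have hS : L.foldl (fun s n => if n = parent then s
            else s + pvGetSumA edges values fuel n index) v = v + S0 :=
          pv_foldl_init_shift L _ parent v
        have hR : L.foldl (fun s n => if n = parent then s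
            else s + pvGetResultA edges values fuel n index) v = v + R0 :=
          pv_foldl_init_shift L _ parent v
        simp only [Prod.mk.injEq]
        constructor
        · exact hS.symm
        · rw [hR, hS]
          omega

-- ===== VERDICT (by name: the statement is the Claim_ definition above) =====
theorem maximumScoreAfterOperations_spec : Claim_equal_maximumScoreAfterOperations := by
  intro edges values _ _
  unfold Spec_maximumScoreAfterOperations maximumScoreAfterOperations
    maximumScoreAfterOperations_alt
  rw [pv_dfs_eq]
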